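-- pv_equiv track=rewrite | github.com/cseelhoff/garage | analyze_la1010.py | decode_debug_entry
-- ===== SOURCE A (Python) =====
-- def decode_debug_entry(samples, start_t, end_t):
--     """Check debug entry sequence: RST low → 2 DC rising edges → RST high."""
--     # Filter samples in time window
--     window = [(t, ch0, ch1, ch2) for t, ch0, ch1, ch2 in samples
--               if start_t <= t <= end_t]
--
--     if not window:
--         return "No samples in window"
--
--     # Find RST (CH2) edges
--     rst_edges = []
--     for i in range(1, len(window)):
--         if window[i][3] != window[i-1][3]:
--             rst_edges.append((window[i][0], "RISE" if window[i][3] == 1 else "FALL"))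
--
--     # Find DC (CH0) rising edges
--     dc_rises = []
--     for i in range(1, len(window)):
--         if window[i][1] == 1 and window[i-1][1] == 0:
--             dc_rises.append(window[i][0])
--
--     return rst_edges, dc_rises
-- ===== SOURCE B (Python) =====
-- def decode_debug_entry(samples, start_t, end_t):
--     """Check debug entry sequence: RST low -> 2 DC rising edges -> RST high.
--
--     Compress each channel of the window into a run-length encoding (one
--     (start_time, value) entry per maximal run of equal values); every run
--     after the first starts an edge, so the edges are read off the run lists."""
--     window = [s for s in samples if start_t <= s[0] <= end_t]
--     if not window:
--         return "No samples in window"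
--     rst_runs = _runs(window, 3)
--     dc_runs = _runs(window, 1)
--     rst_edges = [(t, "RISE" if v == 1 else "FALL") for t, v in rst_runs[1:]]
--     dc_rises = [t for (t, v), (_, pv) in zip(dc_runs[1:], dc_runs)
--                 if v == 1 and pv == 0]
--     return rst_edges, dc_rises
--
--
-- def _runs(window, k):
--     """Run-length encode channel k of window: (first time, value) per run."""
--     runs = []
--     for s in window:
--         if not runs or s[k] != runs[-1][1]:
--             runs.append((s[0], s[k]))
--     return runs
-- ===== Notes on version B (the rewrite author's own statement) =====
-- stated objective: alternative
-- what changed: Instead of A's pairwise comparison of adjacent window samples in two index loops, B run-length-encodes each channel of the window into (start_time, value) runs and reads the RST edges and DC rises off the run lists (every run after the first is an edge).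
-- outside the precondition, e.g. on decode_debug_entry([(5, 0, 0, 0)], 0, 1): A returns 'No samples in window', B returns 'No samples in window'
import Mathlib
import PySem

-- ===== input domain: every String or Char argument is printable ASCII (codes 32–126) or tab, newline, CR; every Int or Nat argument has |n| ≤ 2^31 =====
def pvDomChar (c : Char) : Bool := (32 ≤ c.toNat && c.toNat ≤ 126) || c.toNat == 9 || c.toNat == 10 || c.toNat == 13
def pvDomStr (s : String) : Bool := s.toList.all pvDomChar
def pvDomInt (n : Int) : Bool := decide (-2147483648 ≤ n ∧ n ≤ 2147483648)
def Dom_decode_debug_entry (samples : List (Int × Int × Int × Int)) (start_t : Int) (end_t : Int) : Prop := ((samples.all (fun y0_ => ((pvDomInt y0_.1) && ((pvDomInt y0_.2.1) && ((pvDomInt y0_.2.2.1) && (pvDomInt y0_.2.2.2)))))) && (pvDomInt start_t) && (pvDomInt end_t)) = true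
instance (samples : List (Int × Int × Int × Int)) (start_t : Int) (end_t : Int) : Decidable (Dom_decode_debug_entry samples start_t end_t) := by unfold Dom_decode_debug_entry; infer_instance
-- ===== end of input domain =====

-- B replaces A's pairwise index loops over the window with a per-channel run-length
-- encoding from which the edges are read off (objective: alternative).

-- ===== PORT A =====
-- default for pyGetD; every index A uses is in range, so it is never returned
def pvDflt : Int × Int × Int × Int := (0, 0, 0, 0)

def decode_debug_entry (samples : List (Int × Int × Int × Int)) (start_t : Int) (end_t : Int) : (List (Int × String)) × List Int :=
  let window := samples.filter (fun s => start_t ≤ s.1 && s.1 ≤ end_t)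
  -- (Python returns the string "No samples in window" when window = []; Pre_ excludes that case)
  let rst_edges := (PySem.List.pyRange 1 (window.length : Int) 1).foldl (fun acc i =>
      if (PySem.List.pyGetD window i pvDflt).2.2.2 ≠ (PySem.List.pyGetD window (i - 1) pvDflt).2.2.2 then
        acc ++ [((PySem.List.pyGetD window i pvDflt).1,
                 if (PySem.List.pyGetD window i pvDflt).2.2.2 = 1 then "RISE" else "FALL")]
      else acc) []
  let dc_rises := (PySem.List.pyRange 1 (window.length : Int) 1).foldl (fun acc i =>
      if (PySem.List.pyGetD window i pvDflt).2.1 = 1 ∧ (PySem.List.pyGetD window (i - 1) pvDflt).2.1 = 0 then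
        acc ++ [(PySem.List.pyGetD window i pvDflt).1]
      else acc) []
  (rst_edges, dc_rises)

-- ===== PORT B =====
-- Source B's _runs(window, k): run-length encode one channel (runs[-1][1] is the last run's value)
def pvRunsOf (f : (Int × Int × Int × Int) → Int) (window : List (Int × Int × Int × Int)) : List (Int × Int) :=
  window.foldl (fun runs s =>
    if runs = [] ∨ f s ≠ (runs.getLastD (0, 0)).2 then runs ++ [(s.1, f s)] else runs) []

def decode_debug_entry_alt (samples : List (Int × Int × Int × Int)) (start_t : Int) (end_t : Int) : (List (Int × String)) × List Int :=
  let window := samples.filter (fun s => start_t ≤ s.1 && s.1 ≤ end_t)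
  -- (window = [] means Python B returns the string "No samples in window"; excluded by Pre_)
  let rst_runs := pvRunsOf (fun s => s.2.2.2) window
  let dc_runs := pvRunsOf (fun s => s.2.1) window
  let rst_edges := (rst_runs.drop 1).map (fun r => (r.1, if r.2 = 1 then "RISE" else "FALL"))
  let dc_rises := ((dc_runs.drop 1).zip dc_runs).filterMap
      (fun p => if p.1.2 = 1 ∧ p.2.2 = 0 then some p.1.1 else none)
  (rst_edges, dc_rises)

-- ===== PRECONDITION & SPEC =====
-- Pre_ excludes inputs whose time window contains no sample: there both Pythons return the
-- string "No samples in window", which is not a value of the declared (list, list) return type.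
def Pre_decode_debug_entry (samples : List (Int × Int × Int × Int)) (start_t : Int) (end_t : Int) : Prop :=
  ∃ s ∈ samples, start_t ≤ s.1 ∧ s.1 ≤ end_t
instance (samples : List (Int × Int × Int × Int)) (start_t : Int) (end_t : Int) : Decidable (Pre_decode_debug_entry samples start_t end_t) := by unfold Pre_decode_debug_entry; infer_instance

def pvWitness_decode_debug_entry : (List (Int × Int × Int × Int)) × Int × Int :=
  ([(0, 0, 0, 0), (1, 1, 0, 1), (2, 0, 0, 0)], 0, 2)

def Spec_decode_debug_entry (samples : List (Int × Int × Int × Int)) (start_t : Int) (end_t : Int) (out : (List (Int × String)) × List Int) : Prop := out = decode_debug_entry_alt samples start_t end_t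
instance (samples : List (Int × Int × Int × Int)) (start_t : Int) (end_t : Int) (out : (List (Int × String)) × List Int) : Decidable (Spec_decode_debug_entry samples start_t end_t out) := by unfold Spec_decode_debug_entry; infer_instance

-- ===== CLAIM (what is proved, stated in full; the proofs are below) =====
def Claim_equal_decode_debug_entry : Prop := ∀ (samples : List (Int × Int × Int × Int)) (start_t : Int) (end_t : Int), Dom_decode_debug_entry samples start_t end_t → Pre_decode_debug_entry samples start_t end_t → Spec_decode_debug_entry samples start_t end_t (decode_debug_entry samples start_t end_t)

-- ===== LEMMAS AND PROOFS =====

-- the "per consecutive in-window pair" shape A's loops compute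
def pvPairs {γ : Type} (g : (Int × Int × Int × Int) → (Int × Int × Int × Int) → List γ) :
    (Int × Int × Int × Int) → List (Int × Int × Int × Int) → List γ
  | _, [] => []
  | p, x :: xs => g p x ++ pvPairs g x xs

def pvGR (p s : Int × Int × Int × Int) : List (Int × String) :=
  if s.2.2.2 ≠ p.2.2.2 then [(s.1, if s.2.2.2 = 1 then "RISE" else "FALL")] else []

def pvGD (p s : Int × Int × Int × Int) : List Int :=
  if s.2.1 = 1 ∧ p.2.1 = 0 then [s.1] else []

lemma pv_pg_cons (y : Int × Int × Int × Int) (l : List (Int × Int × Int × Int)) (i : Int)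
    (h : 1 ≤ i) : PySem.List.pyGetD (y :: l) i pvDflt = PySem.List.pyGetD l (i - 1) pvDflt := by
  rw [PySem.List.pyGetD_of_nonneg _ _ (by omega), PySem.List.pyGetD_of_nonneg _ _ (by omega)]
  rw [show i.toNat = (i - 1).toNat + 1 by omega]
  simp [List.getD]

-- A's index loop over window = p :: rest computes the pairs fold
lemma pv_foldA {γ : Type} (g : (Int × Int × Int × Int) → (Int × Int × Int × Int) → List γ) :
    ∀ (rest : List (Int × Int × Int × Int)) (p : Int × Int × Int × Int) (acc : List γ),
    (PySem.List.pyRange 1 ((p :: rest).length : Int) 1).foldl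
      (fun acc i => acc ++ g (PySem.List.pyGetD (p :: rest) (i - 1) pvDflt)
                            (PySem.List.pyGetD (p :: rest) i pvDflt)) acc
    = acc ++ pvPairs g p rest := by
  intro rest
  induction rest with
  | nil =>
    intro p acc
    rw [show (((p :: []).length : Int)) = 1 by simp]
    rw [PySem.List.pyRange_one_eq_nil (by omega)]
    simp [pvPairs]
  | cons x xs ih =>
    intro p acc
    have hlen : (((p :: x :: xs).length : Int)) = (xs.length : Int) + 2 := by
      simp; omega
    rw [hlen, PySem.List.pyRange_one_cons (by omega)]
    simp only [List.foldl_cons]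
    rw [show (1:Int) + 1 = 2 by ring]
    have h0 : PySem.List.pyGetD (p :: x :: xs) ((1 : Int) - 1) pvDflt = p := by
      norm_num [PySem.List.pyGetD_of_nonneg _ _ (by omega : (0:Int) ≤ 1 - 1)]
    have h1 : PySem.List.pyGetD (p :: x :: xs) (1 : Int) pvDflt = x := by
      rw [PySem.List.pyGetD_of_nonneg _ _ (by omega : (0:Int) ≤ 1)]; rfl
    rw [h0, h1]
    have hshift :
        PySem.List.pyRange 2 ((xs.length : Int) + 2) 1 =
          (PySem.List.pyRange 1 ((xs.length : Int) + 1) 1).map (fun i => i + 1) := by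
      rw [PySem.List.pyRange_one, PySem.List.pyRange_one]
      rw [show ((xs.length : Int) + 2 - 2) = (xs.length : Int) by ring,
          show ((xs.length : Int) + 1 - 1) = (xs.length : Int) by ring]
      rw [List.map_map]
      apply List.map_congr_left
      intro k _
      simp [Function.comp]; ring
    rw [hshift, List.foldl_map]
    rw [PySem.List.foldl_congr_mem _ _
        (fun acc i => acc ++ g (PySem.List.pyGetD (x :: xs) (i - 1) pvDflt)
                              (PySem.List.pyGetD (x :: xs) i pvDflt)) _
        (by
          intro a i hi
          have h1i : 1 ≤ i := (PySem.List.mem_pyRange_one.mp hi).1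
          rw [show i + 1 - 1 = i by ring, pv_pg_cons p _ _ h1i,
              pv_pg_cons p _ (i + 1) (by omega), show i + 1 - 1 = i by ring])]
    rw [show ((xs.length : Int) + 1) = ((x :: xs).length : Int) by simp,
        ih x (acc ++ g p x)]
    simp [pvPairs]

-- the tail of the run list (runs after the first), recursively
def pvAux (f : (Int × Int × Int × Int) → Int) :
    (Int × Int × Int × Int) → List (Int × Int × Int × Int) → List (Int × Int)
  | _, [] => []
  | p, x :: xs => if f x ≠ f p then (x.1, f x) :: pvAux f x xs else pvAux f x xs

-- the run-length fold extends a nonempty accumulator whose last value is f p by pvAux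
lemma pv_runs_fold (f : (Int × Int × Int × Int) → Int) :
    ∀ (rest : List (Int × Int × Int × Int)) (p : Int × Int × Int × Int) (acc : List (Int × Int)),
    acc ≠ [] → (acc.getLastD (0, 0)).2 = f p →
    rest.foldl (fun runs s =>
      if runs = [] ∨ f s ≠ (runs.getLastD (0, 0)).2 then runs ++ [(s.1, f s)] else runs) acc
    = acc ++ pvAux f p rest := by
  intro rest
  induction rest with
  | nil => intro p acc _ _; simp [pvAux]
  | cons x xs ih =>
    intro p acc hne hlast
    simp only [List.foldl_cons]
    by_cases hd : f x ≠ f p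
    · rw [if_pos (Or.inr (by rw [hlast]; exact hd))]
      rw [ih x (acc ++ [(x.1, f x)]) (by simp) (by simp)]
      simp [pvAux, hd]
    · push Not at hd
      rw [if_neg (by push Not; exact ⟨hne, by rw [hlast, hd]⟩)]
      rw [ih x acc hne (by rw [hlast, hd])]
      simp [pvAux, hd]

lemma pv_runs_cons (f : (Int × Int × Int × Int) → Int)
    (p : Int × Int × Int × Int) (rest : List (Int × Int × Int × Int)) :
    pvRunsOf f (p :: rest) = (p.1, f p) :: pvAux f p rest := by
  unfold pvRunsOf
  rw [List.foldl_cons, if_pos (Or.inl rfl), List.nil_append]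
  rw [pv_runs_fold f rest p [(p.1, f p)] (by simp) (by simp)]
  simp

-- labelling the RST runs after the first gives A's pairwise RST edges
lemma pv_map_aux :
    ∀ (rest : List (Int × Int × Int × Int)) (p : Int × Int × Int × Int),
    (pvAux (fun s => s.2.2.2) p rest).map (fun r => (r.1, if r.2 = 1 then "RISE" else "FALL"))
    = pvPairs pvGR p rest := by
  intro rest
  induction rest with
  | nil => intro p; simp [pvAux, pvPairs]
  | cons x xs ih =>
    intro p
    by_cases hd : x.2.2.2 ≠ p.2.2.2
    · simp [pvAux, pvPairs, pvGR, hd, ih x]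
    · push Not at hd
      simp [pvAux, pvPairs, pvGR, hd, ih x]

-- scanning consecutive DC runs gives A's pairwise DC rises; q is any run with value = p's DC value
lemma pv_zip_aux :
    ∀ (rest : List (Int × Int × Int × Int)) (p : Int × Int × Int × Int) (q : Int × Int),
    q.2 = p.2.1 →
    ((pvAux (fun s => s.2.1) p rest).zip (q :: pvAux (fun s => s.2.1) p rest)).filterMap
      (fun r => if r.1.2 = 1 ∧ r.2.2 = 0 then some r.1.1 else none)
    = pvPairs pvGD p rest := by
  intro rest
  induction rest with
  | nil => intro p q _; simp [pvAux, pvPairs]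
  | cons x xs ih =>
    intro p q hq
    by_cases hd : x.2.1 ≠ p.2.1
    · simp only [pvAux, if_pos hd, List.zip_cons_cons, List.filterMap_cons]
      rw [ih x (x.1, x.2.1) rfl]
      by_cases hc : x.2.1 = 1 ∧ p.2.1 = 0
      · simp [hq, hc, pvPairs, pvGD]
      · have : ¬ (x.2.1 = 1 ∧ q.2 = 0) := by rw [hq]; exact hc
        simp only [this, pvPairs]
        simp [pvGD, hc]
    · push Not at hd
      simp only [pvAux, if_neg (not_not_intro hd)]
      rw [ih x q (by rw [hq, hd])]
      have hc : ¬ (x.2.1 = 1 ∧ p.2.1 = 0) := by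
        rintro ⟨h1, h0⟩; rw [hd] at h1; omega
      simp [pvPairs, pvGD, hc]

-- ===== VERDICT (by name: the statement is the Claim_ definition above) =====
theorem decode_debug_entry_spec : Claim_equal_decode_debug_entry := by
  intro samples start_t end_t _ hpre
  unfold Spec_decode_debug_entry decode_debug_entry decode_debug_entry_alt
  simp only []
  rcases hw : samples.filter (fun s => start_t ≤ s.1 && s.1 ≤ end_t) with _ | ⟨p, rest⟩
  · exfalso
    obtain ⟨s, hs, h1, h2⟩ := hpre
    have := List.filter_eq_nil_iff.mp hw s hs
    simp [h1, h2] at this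
  · rw [hw, pv_runs_cons, pv_runs_cons]
    simp only [List.drop_one, List.tail_cons]
    rw [pv_map_aux rest p, pv_zip_aux rest p (p.1, p.2.1) rfl]
    rw [PySem.List.foldl_congr_mem _ _
        (fun acc i => acc ++ pvGR (PySem.List.pyGetD (p :: rest) (i - 1) pvDflt)
                              (PySem.List.pyGetD (p :: rest) i pvDflt)) _
        (by intro a i _; simp only [pvGR]; split <;> simp)]
    rw [PySem.List.foldl_congr_mem _ _
        (fun acc i => acc ++ pvGD (PySem.List.pyGetD (p :: rest) (i - 1) pvDflt)
                              (PySem.List.pyGetD (p :: rest) i pvDflt)) _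
        (by intro a i _; simp only [pvGD]; split <;> simp)]
    rw [pv_foldA pvGR rest p [], pv_foldA pvGD rest p []]
    simp
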